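-- pv_equiv track=rewrite | github.com/masino-lab/face2pheno | models/triangle_builder_original.py | find_adjacent_triangles
-- ===== SOURCE A (Python) =====
-- from itertools import combinations
--
-- def find_adjacent_triangles(indexed_triangles):
--     """Finds all pairs of triangles that share a common edge."""
--     edge_to_triangle_map = {}
--
--     for tri_index, nodes in indexed_triangles.items():
--         edges = [
--             tuple(sorted((nodes[0], nodes[1]))),
--             tuple(sorted((nodes[1], nodes[2]))),
--             tuple(sorted((nodes[2], nodes[0])))
--         ]
--         for edge in edges:
--             if edge not in edge_to_triangle_map:
--                 edge_to_triangle_map[edge] = []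
--             edge_to_triangle_map[edge].append(tri_index)
--
--     adjacent_pairs = []
--     for edge, tri_indices in edge_to_triangle_map.items():
--         if len(tri_indices) > 1:
--             for pair in combinations(tri_indices, 2):
--                 adjacent_pairs.append(tuple(sorted(pair)))
--
--     return sorted(list(set(adjacent_pairs)))
-- ===== SOURCE B (Python) =====
-- def find_adjacent_triangles(indexed_triangles):
--     """Finds all pairs of triangles that share a common edge (sort-and-scan)."""
--     occ = []
--     for tri_index, nodes in indexed_triangles.items():
--         a, b, c = nodes[0], nodes[1], nodes[2]
--         for edge in (tuple(sorted((a, b))), tuple(sorted((b, c))), tuple(sorted((c, a)))):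
--             occ.append((edge, tri_index))
--     occ.sort(key=lambda t: t[0])
--     pairs = []
--     i, n = 0, len(occ)
--     while i < n:
--         j = i
--         while j < n and occ[j][0] == occ[i][0]:
--             j += 1
--         group = [idx for _, idx in occ[i:j]]
--         for p in range(len(group)):
--             for q in range(p + 1, len(group)):
--                 u, v = group[p], group[q]
--                 pairs.append((u, v) if u <= v else (v, u))
--         i = j
--     return sorted(set(pairs))
-- ===== Notes on version B (the rewrite author's own statement) =====
-- stated objective: alternative
-- what changed: Replaces A's dict-of-edges grouping plus combinations over map entries by flattening all (edge, triangle) occurrences into one list, sorting it by edge, and emitting pairs inside each equal-edge run of the sorted list.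
import Mathlib
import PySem

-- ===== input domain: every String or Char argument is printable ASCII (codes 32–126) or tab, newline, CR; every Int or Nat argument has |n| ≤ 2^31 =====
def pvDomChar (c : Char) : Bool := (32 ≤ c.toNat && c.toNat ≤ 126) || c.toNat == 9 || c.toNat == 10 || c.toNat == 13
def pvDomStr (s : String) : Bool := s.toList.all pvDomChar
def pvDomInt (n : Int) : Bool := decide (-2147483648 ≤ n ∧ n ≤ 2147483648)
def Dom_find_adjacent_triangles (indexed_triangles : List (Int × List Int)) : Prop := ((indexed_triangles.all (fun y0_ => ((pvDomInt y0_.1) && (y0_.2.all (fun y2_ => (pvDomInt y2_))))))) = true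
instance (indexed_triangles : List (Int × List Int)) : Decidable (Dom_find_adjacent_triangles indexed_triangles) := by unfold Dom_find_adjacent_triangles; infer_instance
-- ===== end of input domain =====

-- B replaces A's dict-of-edges grouping by flattening the (edge, triangle) occurrences,
-- sorting them by edge and scanning equal-edge runs (objective: alternative algorithm, same results).

-- ===== PORT A =====
-- tuple(sorted((a, b))) on a 2-tuple of ints (Python's sort of a pair)
def pvSortPair (a b : Int) : Int × Int := if b < a then (b, a) else (a, b)

-- the three sorted edges of nodes[0..2] (both Pythons compute exactly these)
def pvEdges (nodes : List Int) : List (Int × Int) :=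
  [pvSortPair (PySem.List.pyGetD nodes 0 0) (PySem.List.pyGetD nodes 1 0),
   pvSortPair (PySem.List.pyGetD nodes 1 0) (PySem.List.pyGetD nodes 2 0),
   pvSortPair (PySem.List.pyGetD nodes 2 0) (PySem.List.pyGetD nodes 0 0)]

-- itertools.combinations(l, 2) / the p<q double loop of B
def pvComb2 : List Int → List (Int × Int)
  | [] => []
  | x :: xs => xs.map (fun y => (x, y)) ++ pvComb2 xs

def find_adjacent_triangles (indexed_triangles : List (Int × List Int)) : List (Int × Int) :=
  let m := (PySem.Dict.ofList indexed_triangles).items.foldl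
    (fun m p => (pvEdges p.2).foldl (fun m e => m.insert e (m.getD e [] ++ [p.1])) m)
    PySem.Dict.empty
  let adjacent_pairs := m.items.foldl
    (fun acc p => if 1 < p.2.length then acc ++ (pvComb2 p.2).map (fun pr => pvSortPair pr.1 pr.2) else acc) []
  PySem.List.sorted2 (PySem.Set.ofList adjacent_pairs) (fun x => x.1) (fun x => x.2) false

-- ===== PORT B =====
-- the run-scan of B's while loop: successive groups of equal-edge occurrences
def pvGroups : List ((Int × Int) × Int) → List (List Int)
  | [] => []
  | o :: rest =>
      (o.2 :: (rest.takeWhile (fun q => q.1 == o.1)).map (fun q => q.2))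
        :: pvGroups (rest.dropWhile (fun q => q.1 == o.1))
  termination_by l => l.length
  decreasing_by simpa using Nat.lt_succ_of_le (List.length_dropWhile_le _ _)

def find_adjacent_triangles_alt (indexed_triangles : List (Int × List Int)) : List (Int × Int) :=
  let occ := (PySem.Dict.ofList indexed_triangles).items.foldl
    (fun acc p => acc ++ (pvEdges p.2).map (fun e => (e, p.1))) []
  let socc := PySem.List.sorted2 occ (fun o => o.1.1) (fun o => o.1.2) false
  let pairs := (pvGroups socc).foldl
    (fun acc g => acc ++ (pvComb2 g).map (fun pr => if pr.1 ≤ pr.2 then pr else (pr.2, pr.1))) []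
  PySem.List.sorted2 (PySem.Set.ofList pairs) (fun x => x.1) (fun x => x.2) false

-- ===== PRECONDITION & SPEC =====
-- Pre_ excludes exactly the inputs on which Python A raises IndexError: a triangle value of the
-- dict with fewer than three nodes (A reads nodes[0], nodes[1], nodes[2]).
def Pre_find_adjacent_triangles (indexed_triangles : List (Int × List Int)) : Prop :=
  ∀ p ∈ (PySem.Dict.ofList indexed_triangles).items, 3 ≤ p.2.length
instance (indexed_triangles : List (Int × List Int)) : Decidable (Pre_find_adjacent_triangles indexed_triangles) := by unfold Pre_find_adjacent_triangles; infer_instance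

def pvWitness_find_adjacent_triangles : (List (Int × List Int)) := [(1, [0, 1, 2]), (2, [1, 2, 3])]

def Spec_find_adjacent_triangles (indexed_triangles : List (Int × List Int)) (out : List (Int × Int)) : Prop := out = find_adjacent_triangles_alt indexed_triangles
instance (indexed_triangles : List (Int × List Int)) (out : List (Int × Int)) : Decidable (Spec_find_adjacent_triangles indexed_triangles out) := by unfold Spec_find_adjacent_triangles; infer_instance

-- ===== CLAIM (what is proved, stated in full; the proofs are below) =====
def Claim_equal_find_adjacent_triangles : Prop := ∀ (indexed_triangles : List (Int × List Int)), Dom_find_adjacent_triangles indexed_triangles → Pre_find_adjacent_triangles indexed_triangles → Spec_find_adjacent_triangles indexed_triangles (find_adjacent_triangles indexed_triangles)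

-- ===== LEMMAS AND PROOFS =====

-- the flattened occurrence list, the per-edge group, the oriented pairs of one group
def pvOccOf (its : List (Int × List Int)) : List ((Int × Int) × Int) :=
  ((PySem.Dict.ofList its).items).flatMap (fun p => (pvEdges p.2).map (fun e => (e, p.1)))

def pvGrp (l : List ((Int × Int) × Int)) (e : Int × Int) : List Int :=
  (l.filter (fun o => o.1 == e)).map (fun o => o.2)

def pvPairsOf (g : List Int) : List (Int × Int) :=
  (pvComb2 g).map (fun pr => pvSortPair pr.1 pr.2)

def pvChar (x : Int × Int) (g : List Int) : Prop :=
  x.1 ≤ x.2 ∧ ((x.1 = x.2 ∧ 2 ≤ g.count x.1) ∨ (x.1 ≠ x.2 ∧ x.1 ∈ g ∧ x.2 ∈ g))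

def pvRel (a b : (Int × Int) × Int) : Prop :=
  a.1.1 < b.1.1 ∨ (a.1.1 = b.1.1 ∧ a.1.2 ≤ b.1.2)

theorem pvSortPair_eq (a b : Int) : pvSortPair a b = if a ≤ b then (a, b) else (b, a) := by
  unfold pvSortPair
  rcases lt_or_ge b a with h | h
  · rw [if_pos h, if_neg (by omega)]
  · rw [if_neg (by omega), if_pos (by omega)]

theorem pvSortPair_cases (a y u v : Int) :
    pvSortPair a y = (u, v) ↔ (a ≤ y ∧ a = u ∧ y = v) ∨ (y < a ∧ y = u ∧ a = v) := by
  rw [pvSortPair_eq]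
  split_ifs with h <;> simp [Prod.ext_iff] <;> omega

theorem mem_pvPairsOf (x : Int × Int) (g : List Int) : x ∈ pvPairsOf g ↔ pvChar x g := by
  obtain ⟨u, v⟩ := x
  induction g with
  | nil => simp [pvPairsOf, pvComb2, pvChar]
  | cons a g ih =>
    have L : (u, v) ∈ pvPairsOf (a :: g) ↔
        ((∃ y, y ∈ g ∧ pvSortPair a y = (u, v)) ∨ (u, v) ∈ pvPairsOf g) := by
      simp only [pvPairsOf, pvComb2, List.map_append, List.mem_append, List.map_map,
        List.mem_map, Function.comp_def]
    rw [L, ih]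
    simp only [pvSortPair_cases, pvChar, List.count_cons, List.mem_cons]
    constructor
    · rintro (⟨y, hyg, ⟨hle, rfl, rfl⟩ | ⟨hlt, rfl, rfl⟩⟩ | ⟨h1, h2⟩)
      · by_cases huv : a = y
        · subst huv
          have hpos : 0 < g.count a := List.count_pos_iff.mpr hyg
          refine ⟨le_refl _, Or.inl ⟨rfl, ?_⟩⟩
          simp
          omega
        · exact ⟨hle, Or.inr ⟨huv, Or.inl rfl, Or.inr hyg⟩⟩
      · exact ⟨by omega, Or.inr ⟨by omega, Or.inr hyg, Or.inl rfl⟩⟩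
      · refine ⟨h1, ?_⟩
        rcases h2 with ⟨he, hc⟩ | ⟨hne, hm1, hm2⟩
        · refine Or.inl ⟨he, ?_⟩
          split_ifs <;> omega
        · exact Or.inr ⟨hne, Or.inr hm1, Or.inr hm2⟩
    · rintro ⟨h1, ⟨rfl, hc⟩ | ⟨hne, hm1, hm2⟩⟩
      · by_cases ha : u = a
        · subst ha
          have hpos : 0 < g.count u := by
            have hb : (u == u) = true := beq_self_eq_true u
            rw [if_pos hb] at hc
            omega
          exact Or.inl ⟨u, List.count_pos_iff.mp hpos, Or.inl ⟨le_refl _, rfl, rfl⟩⟩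
        · have hc' : 2 ≤ g.count u := by
            split_ifs at hc with h
            · exact absurd (eq_of_beq h).symm ha
            · omega
          exact Or.inr ⟨h1, Or.inl ⟨rfl, hc'⟩⟩
      · rcases hm1 with rfl | hm1
        · rcases hm2 with hva | hm2
          · exact absurd hva.symm hne
          · exact Or.inl ⟨v, hm2, Or.inl ⟨h1, rfl, rfl⟩⟩
        · rcases hm2 with rfl | hm2
          · exact Or.inl ⟨u, hm1, Or.inr ⟨by omega, rfl, rfl⟩⟩
          · exact Or.inr ⟨h1, Or.inr ⟨hne, hm1, hm2⟩⟩

theorem pvChar_perm (x : Int × Int) {g g' : List Int} (h : g.Perm g') : pvChar x g ↔ pvChar x g' := by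
  simp [pvChar, h.count_eq, h.mem_iff]

-- insertion into a list with no later element strictly before an earlier one keeps that shape
theorem pvPairwise_insertBy {α : Type} (before : α → α → Bool)
    (htrans : ∀ a b c, before a b = true → before b c = true → before a c = true)
    (hasym : ∀ a b, before a b = true → before b a = false)
    (x : α) :
    ∀ acc : List α, acc.Pairwise (fun a b => before b a = false) →
      (PySem.List.insertBy before x acc).Pairwise (fun a b => before b a = false) := by
  intro acc
  induction acc with
  | nil => intro _; simp [PySem.List.insertBy]
  | cons y ys ih =>
    intro h
    rw [List.pairwise_cons] at h
    obtain ⟨hy, hys⟩ := h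
    show (PySem.List.insertBy before x (y :: ys)).Pairwise _
    rw [PySem.List.insertBy]
    split
    · rename_i hxy
      refine List.Pairwise.cons ?_ (List.Pairwise.cons hy hys)
      intro z hz
      rcases List.mem_cons.mp hz with rfl | hz'
      · exact hasym _ _ hxy
      · by_cases hzx : before z x = true
        · have := htrans _ _ _ hzx hxy
          rw [hy z hz'] at this; exact absurd this (by simp)
        · simpa using hzx
    · rename_i hxy
      refine List.Pairwise.cons ?_ (ih hys)
      intro z hz
      rcases (PySem.List.mem_insertBy before x z ys).mp hz with rfl | hz'
      · simpa using hxy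
      · exact hy z hz'

theorem pvPairwise_foldl_insertBy {α : Type} (before : α → α → Bool)
    (htrans : ∀ a b c, before a b = true → before b c = true → before a c = true)
    (hasym : ∀ a b, before a b = true → before b a = false) :
    ∀ (l acc : List α), acc.Pairwise (fun a b => before b a = false) →
      (l.foldl (fun acc x => PySem.List.insertBy before x acc) acc).Pairwise
        (fun a b => before b a = false) := by
  intro l
  induction l with
  | nil => intro acc h; exact h
  | cons a l ih =>
    intro acc h
    exact ih _ (pvPairwise_insertBy before htrans hasym a acc h)

theorem pvSorted2_pairwise {α : Type} (xs : List α) (k1 k2 : α → Int) :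
    (PySem.List.sorted2 xs k1 k2 false).Pairwise
      (fun a b => k1 a < k1 b ∨ (k1 a = k1 b ∧ k2 a ≤ k2 b)) := by
  have h := pvPairwise_foldl_insertBy
    (fun a b => decide (k1 a < k1 b) || (!decide (k1 b < k1 a) && decide (k2 a < k2 b)))
    (by intro a b c h1 h2; simp at h1 h2 ⊢; omega)
    (by intro a b h1; simp at h1 ⊢; omega)
    xs [] (by simp)
  have heq : PySem.List.sorted2 xs k1 k2 false
      = xs.foldl (fun acc x => PySem.List.insertBy
          (fun a b => decide (k1 a < k1 b) || (!decide (k1 b < k1 a) && decide (k2 a < k2 b))) x acc) [] := by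
    rfl
  rw [heq]
  refine h.imp ?_
  intro a b hab
  simp at hab
  omega

theorem sorted2_pairs_congr {xs ys : List (Int × Int)} (h : xs.Perm ys) :
    PySem.List.sorted2 xs (fun x => x.1) (fun x => x.2) false
      = PySem.List.sorted2 ys (fun x => x.1) (fun x => x.2) false := by
  apply List.Perm.eq_of_pairwise (le := fun a b => a.1 < b.1 ∨ (a.1 = b.1 ∧ a.2 ≤ b.2))
  · intro a b _ _ hab hba
    rcases a with ⟨a1, a2⟩; rcases b with ⟨b1, b2⟩
    simp at hab hba ⊢
    omega
  · exact pvSorted2_pairwise xs _ _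
  · exact pvSorted2_pairwise ys _ _
  · exact ((PySem.List.sorted2_perm xs _ _ false).trans h).trans
      (PySem.List.sorted2_perm ys _ _ false).symm

theorem pvFoldl_ite_append {α β : Type} (c : α → Prop) [DecidablePred c] (g : α → List β)
    (l : List α) : ∀ (acc : List β),
      l.foldl (fun acc x => if c x then acc ++ g x else acc) acc
        = acc ++ (l.filter (fun x => decide (c x))).flatMap g := by
  induction l with
  | nil => intro acc; simp
  | cons a l ih =>
    intro acc
    by_cases h : c a <;> simp [h, ih]

theorem pvBuild_eq (items : List (Int × List Int)) :
    ∀ m : PySem.Dict (Int × Int) (List Int),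
      items.foldl (fun m p => (pvEdges p.2).foldl (fun m e => m.insert e (m.getD e [] ++ [p.1])) m) m
        = (items.flatMap (fun p => (pvEdges p.2).map (fun e => (e, p.1)))).foldl
            (fun m o => m.insert o.1 (m.getD o.1 [] ++ [o.2])) m := by
  induction items with
  | nil => intro m; rfl
  | cons p items ih =>
    intro m
    simp only [List.foldl_cons, List.flatMap_cons, List.foldl_append, List.foldl_map]
    rw [ih]

theorem pvGetD_build (occ : List ((Int × Int) × Int)) :
    ∀ (m : PySem.Dict (Int × Int) (List Int)) (e : Int × Int),
      (occ.foldl (fun m o => m.insert o.1 (m.getD o.1 [] ++ [o.2])) m).getD e []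
        = m.getD e [] ++ pvGrp occ e := by
  induction occ with
  | nil => intro m e; simp [pvGrp]
  | cons o os ih =>
    intro m e
    simp only [List.foldl_cons]
    rw [ih]
    by_cases h : e = o.1
    · rw [PySem.Dict.getD_insert]
      simp [pvGrp, h]
    · rw [PySem.Dict.getD_insert_of_ne _ _ _ h]
      have hb : (o.1 == e) = false := by simpa using fun hh => h hh.symm
      simp [pvGrp, hb]

theorem pvKeys_build (occ : List ((Int × Int) × Int)) :
    ((occ.foldl (fun m o => m.insert o.1 (m.getD o.1 [] ++ [o.2]))
        (PySem.Dict.empty : PySem.Dict (Int × Int) (List Int)))).keys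
      = PySem.Set.ofList (occ.map (fun o => o.1)) := by
  have h := PySem.Dict.keys_foldl_insert_key (ν := List Int) occ (fun o => o.1)
    (fun d o => d.getD o.1 [] ++ [o.2]) PySem.Dict.empty
  simpa [PySem.Dict.keys_empty] using h

theorem pvGrp_length (x : Int × Int) (g : List Int) (h : pvChar x g) : 1 < g.length := by
  obtain ⟨h1, h2⟩ := h
  rcases h2 with ⟨he, hc⟩ | ⟨hne, hm1, hm2⟩
  · have := List.count_le_length (a := x.1) (l := g)
    omega
  · rcases g with _ | ⟨a, _ | ⟨b, t⟩⟩
    · simp at hm1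
    · simp at hm1 hm2
      exact absurd (hm1.trans hm2.symm) hne
    · simp

theorem memA (its : List (Int × List Int)) (x : Int × Int) :
    x ∈ (((PySem.Dict.ofList its).items.foldl
        (fun m p => (pvEdges p.2).foldl (fun m e => m.insert e (m.getD e [] ++ [p.1])) m)
        PySem.Dict.empty).items.foldl
      (fun acc p => if 1 < p.2.length then acc ++ (pvComb2 p.2).map (fun pr => pvSortPair pr.1 pr.2) else acc) [])
    ↔ ∃ e, pvChar x (pvGrp (pvOccOf its) e) := by
  rw [pvBuild_eq]
  set occ := (PySem.Dict.ofList its).items.flatMap (fun p => (pvEdges p.2).map (fun e => (e, p.1))) with hocc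
  have hoccOf : pvOccOf its = occ := rfl
  set m := occ.foldl (fun m o => m.insert o.1 (m.getD o.1 [] ++ [o.2]))
    (PySem.Dict.empty : PySem.Dict (Int × Int) (List Int)) with hm
  have hnd : m.keys.Nodup := by
    rw [hm, pvKeys_build]
    exact PySem.Set.nodup_ofList _
  have hgetD : ∀ e, m.getD e [] = pvGrp occ e := by
    intro e
    rw [hm, pvGetD_build, PySem.Dict.getD_empty, List.nil_append]
  have hfold : (m.items.foldl
      (fun acc p => if 1 < p.2.length then acc ++ (pvComb2 p.2).map (fun pr => pvSortPair pr.1 pr.2) else acc) [])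
      = (m.items.filter (fun p => decide (1 < p.2.length))).flatMap (fun p => pvPairsOf p.2) := by
    have := pvFoldl_ite_append (fun p : (Int × Int) × List Int => 1 < p.2.length)
      (fun p => pvPairsOf p.2) m.items []
    simpa [pvPairsOf] using this
  rw [hfold, hoccOf]
  simp only [List.mem_flatMap, List.mem_filter, decide_eq_true_eq]
  constructor
  · rintro ⟨⟨e, l⟩, ⟨hmem, _⟩, hx⟩
    have hl : l = pvGrp occ e := by
      have := PySem.Dict.getD_of_mem_items m hmem hnd []
      rw [hgetD] at this
      exact this.symm
    exact ⟨e, (mem_pvPairsOf x _).mp (hl ▸ hx)⟩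
  · rintro ⟨e, hchar⟩
    have hlen : 1 < (pvGrp occ e).length := pvGrp_length x _ hchar
    have hkey : e ∈ m.keys := by
      rw [hm, pvKeys_build, PySem.Set.mem_ofList]
      have hne : pvGrp occ e ≠ [] := by
        intro h0
        rw [h0] at hlen
        simp at hlen
      obtain ⟨z, hz⟩ : ∃ z, z ∈ occ.filter (fun o => o.1 == e) := by
        rcases hflt : occ.filter (fun o => o.1 == e) with _ | ⟨z, t⟩
        · exact absurd (by simp [pvGrp, hflt]) hne
        · exact ⟨z, by rw [hflt]; simp⟩
      have hz1 : z ∈ occ := List.mem_of_mem_filter hz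
      have hz2 : z.1 = e := by simpa using List.of_mem_filter hz
      exact List.mem_map.mpr ⟨z, hz1, hz2⟩
    obtain ⟨v, hv⟩ : ∃ v, m.get? e = some v := by
      rcases hq : m.get? e with _ | v
      · exact absurd ((PySem.Dict.get?_eq_none_iff_not_mem_keys m e).mp hq) (by simpa using hkey)
      · exact ⟨v, rfl⟩
    have hveq : v = pvGrp occ e := by
      have := PySem.Dict.getD_of_get?_eq_some (d := m) [] hv
      rw [hgetD] at this
      exact this.symm
    refine ⟨(e, v), ⟨(PySem.Dict.get?_eq_some_iff_mem_items m e v hnd).mp hv, ?_⟩, ?_⟩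
    · simpa [hveq] using hlen
    · exact (mem_pvPairsOf x _).mpr (by rwa [hveq])

theorem pvGroups_mem (x : Int × Int) :
    ∀ l : List ((Int × Int) × Int), l.Pairwise pvRel →
      ((∃ g ∈ pvGroups l, x ∈ pvPairsOf g) ↔ ∃ e, pvChar x (pvGrp l e)) := by
  intro l
  induction l using pvGroups.induct with
  | case1 =>
    intro _
    simp [pvGroups, pvGrp, pvChar]
  | case2 o rest ih =>
    intro hpw
    rw [List.pairwise_cons] at hpw
    obtain ⟨ho, hrest⟩ := hpw
    have hdsub : (rest.dropWhile (fun q => q.1 == o.1)).Sublist rest := List.dropWhile_sublist _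
    have hdpw : (rest.dropWhile (fun q => q.1 == o.1)).Pairwise pvRel := hrest.sublist hdsub
    have hdall : ∀ z ∈ rest.dropWhile (fun q => q.1 == o.1), ¬ (z.1 = o.1) := by
      intro z hz
      rcases hdw : rest.dropWhile (fun q => q.1 == o.1) with _ | ⟨b, d'⟩
      · rw [hdw] at hz; simp at hz
      · rw [hdw] at hz
        have hbne : rest.dropWhile (fun q => q.1 == o.1) ≠ [] := by rw [hdw]; simp
        have hb := List.head_dropWhile_not (fun q : (Int × Int) × Int => q.1 == o.1) hbne
        have hhead : (rest.dropWhile (fun q : (Int × Int) × Int => q.1 == o.1)).head hbne = b := by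
          simp [hdw]
        rw [hhead] at hb
        simp at hb
        have hbmem : b ∈ rest := (hdw ▸ hdsub).subset (by simp)
        have hob : pvRel o b := ho b hbmem
        have hpd : (b :: d').Pairwise pvRel := hdw ▸ hdpw
        rw [List.pairwise_cons] at hpd
        rcases List.mem_cons.mp hz with rfl | hz'
        · exact hb
        · intro hzo
          have hbz : pvRel b z := hpd.1 z hz'
          unfold pvRel at hob hbz
          have hz1 : z.1.1 = o.1.1 := by rw [hzo]
          have hz2 : z.1.2 = o.1.2 := by rw [hzo]
          apply hb
          have : b.1.1 = o.1.1 ∧ b.1.2 = o.1.2 := by omega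
          rw [Prod.ext_iff]
          exact this
    have htall : ∀ z ∈ rest.takeWhile (fun q => q.1 == o.1), z.1 = o.1 := by
      intro z hz
      simpa using List.mem_takeWhile_imp hz
    have hfo : pvGrp (o :: rest) o.1 = o.2 :: (rest.takeWhile (fun q => q.1 == o.1)).map (fun q => q.2) := by
      unfold pvGrp
      rw [List.filter_cons, if_pos (by simp)]
      conv_lhs => rw [← List.takeWhile_append_dropWhile (p := fun q => q.1 == o.1) (l := rest)]
      rw [List.filter_append,
        List.filter_eq_self.mpr (fun z hz => by simpa using htall z hz),
        List.filter_eq_nil_iff.mpr (fun z hz => by simpa using hdall z hz),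
        List.append_nil, List.map_cons]
    have hfe : ∀ e, e ≠ o.1 → pvGrp (o :: rest) e = pvGrp (rest.dropWhile (fun q => q.1 == o.1)) e := by
      intro e he
      unfold pvGrp
      rw [List.filter_cons,
        if_neg (show ¬((o.1 == e) = true) by simp only [beq_iff_eq]; exact fun hh => he hh.symm)]
      conv_lhs => rw [← List.takeWhile_append_dropWhile (p := fun q => q.1 == o.1) (l := rest)]
      rw [List.filter_append, List.filter_eq_nil_iff.mpr
        (fun z hz => by
          simp only [beq_iff_eq]
          rw [htall z hz]
          exact fun hze => he hze.symm), List.nil_append]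
    have hfod : pvGrp (rest.dropWhile (fun q => q.1 == o.1)) o.1 = [] := by
      unfold pvGrp
      rw [List.filter_eq_nil_iff.mpr (fun z hz => by simpa using hdall z hz)]
      rfl
    rw [pvGroups]
    constructor
    · rintro ⟨g, hg, hx⟩
      rcases List.mem_cons.mp hg with rfl | hg'
      · exact ⟨o.1, (mem_pvPairsOf x _).mp (by rwa [hfo])⟩
      · obtain ⟨e, hchar⟩ := (ih hdpw).mp ⟨g, hg', hx⟩
        by_cases he : e = o.1
        · rw [he, hfod] at hchar
          simp [pvChar] at hchar
        · exact ⟨e, by rwa [hfe e he]⟩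
    · rintro ⟨e, hchar⟩
      by_cases he : e = o.1
      · refine ⟨o.2 :: (rest.takeWhile (fun q => q.1 == o.1)).map (fun q => q.2), by simp, ?_⟩
        exact (mem_pvPairsOf x _).mpr (by rwa [← hfo, ← he])
      · obtain ⟨g, hg, hx⟩ := (ih hdpw).mpr ⟨e, by rwa [hfe e he] at hchar⟩
        exact ⟨g, List.mem_cons.mpr (Or.inr hg), hx⟩

theorem memB (its : List (Int × List Int)) (x : Int × Int) :
    x ∈ ((pvGroups (PySem.List.sorted2
          ((PySem.Dict.ofList its).items.foldl (fun acc p => acc ++ (pvEdges p.2).map (fun e => (e, p.1))) [])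
          (fun o => o.1.1) (fun o => o.1.2) false)).foldl
        (fun acc g => acc ++ (pvComb2 g).map (fun pr => if pr.1 ≤ pr.2 then pr else (pr.2, pr.1))) [])
    ↔ ∃ e, pvChar x (pvGrp (pvOccOf its) e) := by
  have hocc : ((PySem.Dict.ofList its).items.foldl (fun acc p => acc ++ (pvEdges p.2).map (fun e => (e, p.1))) [])
      = pvOccOf its := by
    rw [PySem.List.foldl_append_eq_flatMap]
    rfl
  rw [hocc]
  set socc := PySem.List.sorted2 (pvOccOf its) (fun o => o.1.1) (fun o => o.1.2) false with hsocc
  have horient : (fun pr : Int × Int => if pr.1 ≤ pr.2 then pr else (pr.2, pr.1))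
      = fun pr => pvSortPair pr.1 pr.2 := by
    funext pr
    rcases pr with ⟨a, b⟩
    rw [pvSortPair_eq]
  rw [horient]
  have hfold : ((pvGroups socc).foldl
      (fun acc g => acc ++ (pvComb2 g).map (fun pr => pvSortPair pr.1 pr.2)) [])
      = (pvGroups socc).flatMap (fun g => pvPairsOf g) := by
    have := PySem.List.foldl_append_eq_flatMap (fun g => pvPairsOf g) (pvGroups socc) []
    simpa [pvPairsOf] using this
  rw [hfold]
  have hpw : socc.Pairwise pvRel := by
    have := pvSorted2_pairwise (pvOccOf its) (fun o => o.1.1) (fun o => o.1.2)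
    exact this.imp (fun h => h)
  rw [List.mem_flatMap.trans (by rfl)]
  rw [show (∃ g ∈ pvGroups socc, x ∈ pvPairsOf g) ↔ ∃ e, pvChar x (pvGrp socc e) from
    pvGroups_mem x socc hpw]
  constructor
  · rintro ⟨e, hchar⟩
    refine ⟨e, (pvChar_perm x ?_).mp hchar⟩
    exact ((PySem.List.sorted2_perm (pvOccOf its) _ _ false).filter _).map _
  · rintro ⟨e, hchar⟩
    refine ⟨e, (pvChar_perm x ?_).mpr hchar⟩
    exact ((PySem.List.sorted2_perm (pvOccOf its) _ _ false).filter _).map _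

-- ===== VERDICT (by name: the statement is the Claim_ definition above) =====
theorem find_adjacent_triangles_spec : Claim_equal_find_adjacent_triangles := by
  intro its _ _
  unfold Spec_find_adjacent_triangles find_adjacent_triangles find_adjacent_triangles_alt
  apply sorted2_pairs_congr
  rw [List.perm_ext_iff_of_nodup (PySem.Set.nodup_ofList _) (PySem.Set.nodup_ofList _)]
  intro x
  rw [PySem.Set.mem_ofList, PySem.Set.mem_ofList, memA, memB]
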